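-- pv_equiv track=rewrite | github.com/YUBIN-githubb/CodingTest | 프로그래머스/1/388351. 유연근무제/유연근무제.py | solution
-- ===== SOURCE A (Python) =====
-- def solution(schedules, timelogs, startday):
--     member = [0]*len(schedules)
--     answer = 0
--     week = []
--     schedule = []
--     for i in range (0,7):
--         week.append((startday + i -1) % 7 + 1)
--
--     for i in range (0,len(schedules)):
--         hour = (schedules[i]//100)*60
--         minute = (schedules[i]%100)
--         h = (hour + minute + 10)//60
--         m = (hour + minute + 10)%60
--         schedule.append((schedules[i], h*100 + m))
--
--     for i in range (0,len(week)):
--         if week[i] == 6 or week[i] == 7: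
--             continue
--         else:
--             for j in range(0,len(schedules)):
--                 if timelogs[j][i] > schedule[j][1]:
--                     member[j] += 1
--     return member.count(0)
-- ===== SOURCE B (Python) =====
-- def solution(schedules, timelogs, startday):
--     workdays = [i for i in range(7) if (startday + i - 1) % 7 + 1 not in (6, 7)]
--     answer = 0
--     for j, s in enumerate(schedules):
--         total = (s // 100) * 60 + s % 100 + 10
--         deadline = (total // 60) * 100 + total % 60
--         if all(timelogs[j][i] <= deadline for i in workdays):
--             answer += 1
--     return answer
-- ===== Notes on version B (the rewrite author's own statement) =====
-- stated objective: simpler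
-- what changed: Replaces A's three builder lists (week, schedule, per-member lateness counters) and the final member.count(0) scan by a single member-outer loop that computes each deadline once and tests all workdays with a short-circuiting all(), counting on-time members directly.
import Mathlib
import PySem

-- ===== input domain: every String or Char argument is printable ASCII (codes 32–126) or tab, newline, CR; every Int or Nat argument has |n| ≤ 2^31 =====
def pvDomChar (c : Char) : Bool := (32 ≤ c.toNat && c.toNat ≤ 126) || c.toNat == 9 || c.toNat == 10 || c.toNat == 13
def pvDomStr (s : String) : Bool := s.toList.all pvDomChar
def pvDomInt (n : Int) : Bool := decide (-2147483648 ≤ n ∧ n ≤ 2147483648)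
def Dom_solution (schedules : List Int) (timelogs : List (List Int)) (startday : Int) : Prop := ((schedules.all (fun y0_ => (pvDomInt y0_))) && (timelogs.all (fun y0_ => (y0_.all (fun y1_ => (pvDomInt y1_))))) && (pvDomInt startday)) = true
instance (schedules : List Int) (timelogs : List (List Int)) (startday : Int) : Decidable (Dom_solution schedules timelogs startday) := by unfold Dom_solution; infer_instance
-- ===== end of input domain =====

-- B replaces A's three builder lists and final member.count(0) scan by one member-outer
-- loop testing all workdays with a short-circuiting all(); same cost, simpler decomposition.

-- ===== PORT A =====
def solution (schedules : List Int) (timelogs : List (List Int)) (startday : Int) : Int :=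
  let member : List Int := List.replicate schedules.length 0
  let week : List Int :=
    (PySem.List.pyRange 0 7 1).foldl
      (fun w i => w ++ [PySem.Int.mod (startday + i - 1) 7 + 1]) []
  let schedule : List (Int × Int) :=
    (PySem.List.pyRange 0 (schedules.length : Int) 1).foldl
      (fun sc i =>
        let hour := PySem.Int.floordiv (PySem.List.pyGetD schedules i 0) 100 * 60
        let minute := PySem.Int.mod (PySem.List.pyGetD schedules i 0) 100
        let h := PySem.Int.floordiv (hour + minute + 10) 60
        let m := PySem.Int.mod (hour + minute + 10) 60
        sc ++ [(PySem.List.pyGetD schedules i 0, h * 100 + m)]) []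
  let member :=
    (PySem.List.pyRange 0 (week.length : Int) 1).foldl
      (fun mem i =>
        if PySem.List.pyGetD week i 0 = 6 ∨ PySem.List.pyGetD week i 0 = 7 then mem
        else
          (PySem.List.pyRange 0 (schedules.length : Int) 1).foldl
            (fun mem j =>
              if PySem.List.pyGetD (PySem.List.pyGetD timelogs j []) i 0 >
                  (PySem.List.pyGetD schedule j (0, 0)).2 then
                PySem.List.pySetD mem j (PySem.List.pyGetD mem j 0 + 1)
              else mem) mem) member
  ((member.count 0 : Nat) : Int)

-- ===== PORT B =====
def solution_alt (schedules : List Int) (timelogs : List (List Int)) (startday : Int) : Int :=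
  let workdays : List Int :=
    (PySem.List.pyRange 0 7 1).filter
      (fun i => !(PySem.Int.mod (startday + i - 1) 7 + 1 == 6 ||
                  PySem.Int.mod (startday + i - 1) 7 + 1 == 7))
  (PySem.List.enumerate schedules).foldl
    (fun answer js =>
      let total := PySem.Int.floordiv js.2 100 * 60 + PySem.Int.mod js.2 100 + 10
      let deadline := PySem.Int.floordiv total 60 * 100 + PySem.Int.mod total 60
      if workdays.all
           (fun i => PySem.List.pyGetD (PySem.List.pyGetD timelogs js.1 []) i 0 ≤ deadline)
      then answer + 1 else answer) 0

-- ===== PRECONDITION & SPEC =====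
-- Pre_ excludes exactly the inputs on which Python A raises IndexError: timelogs shorter
-- than schedules, or some needed row lacking an entry for a weekday index.
def Pre_solution (schedules : List Int) (timelogs : List (List Int)) (startday : Int) : Prop :=
  schedules.length ≤ timelogs.length ∧
  ∀ row ∈ timelogs.take schedules.length, ∀ i ∈ PySem.List.pyRange 0 7 1,
    (PySem.Int.mod (startday + i - 1) 7 + 1 ≠ 6 ∧ PySem.Int.mod (startday + i - 1) 7 + 1 ≠ 7) →
    i < (row.length : Int)
instance (schedules : List Int) (timelogs : List (List Int)) (startday : Int) : Decidable (Pre_solution schedules timelogs startday) := by unfold Pre_solution; infer_instance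

def pvWitness_solution : List Int × List (List Int) × Int :=
  ([900], [[900, 900, 900, 900, 900, 900, 900]], 1)

def Spec_solution (schedules : List Int) (timelogs : List (List Int)) (startday : Int) (out : Int) : Prop := out = solution_alt schedules timelogs startday
instance (schedules : List Int) (timelogs : List (List Int)) (startday : Int) (out : Int) : Decidable (Spec_solution schedules timelogs startday out) := by unfold Spec_solution; infer_instance

-- ===== CLAIM (what is proved, stated in full; the proofs are below) =====
def Claim_equal_solution : Prop := ∀ (schedules : List Int) (timelogs : List (List Int)) (startday : Int), Dom_solution schedules timelogs startday → Pre_solution schedules timelogs startday → Spec_solution schedules timelogs startday (solution schedules timelogs startday)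

-- ===== LEMMAS AND PROOFS =====

-- the common deadline arithmetic
def pvDL (s : Int) : Int :=
  PySem.Int.floordiv (PySem.Int.floordiv s 100 * 60 + PySem.Int.mod s 100 + 10) 60 * 100 +
  PySem.Int.mod (PySem.Int.floordiv s 100 * 60 + PySem.Int.mod s 100 + 10) 60

-- timelogs[j][i], totalised as in both ports
def pvTL (timelogs : List (List Int)) (j i : Int) : Int :=
  PySem.List.pyGetD (PySem.List.pyGetD timelogs j []) i 0

-- the workday indices, as B builds them
def pvDays (startday : Int) : List Int :=
  (PySem.List.pyRange 0 7 1).filter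
    (fun i => !(PySem.Int.mod (startday + i - 1) 7 + 1 == 6 ||
                PySem.Int.mod (startday + i - 1) 7 + 1 == 7))

-- A's inner loop over j: each index in [a, a+m) gets +1 iff p holds there
lemma pv_inner (p : Int → Prop) [DecidablePred p] :
    ∀ (m : Nat) (a : Int) (mem : List Int), 0 ≤ a → a + m ≤ (mem.length : Int) →
    ((PySem.List.pyRange a (a + m) 1).foldl
        (fun mem j => if p j then PySem.List.pySetD mem j (PySem.List.pyGetD mem j 0 + 1)
                      else mem) mem).length = mem.length ∧
    ∀ k : Nat,
      ((PySem.List.pyRange a (a + m) 1).foldl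
        (fun mem j => if p j then PySem.List.pySetD mem j (PySem.List.pyGetD mem j 0 + 1)
                      else mem) mem).getD k 0 =
      if a ≤ (k : Int) ∧ (k : Int) < a + m ∧ p k then mem.getD k 0 + 1 else mem.getD k 0 := by
  intro m
  induction m with
  | zero =>
    intro a mem ha _
    rw [show a + (0:Nat) = a by push_cast; ring, PySem.List.pyRange_one_eq_nil le_rfl]
    refine ⟨rfl, fun k => ?_⟩
    rw [if_neg (by omega)]; rfl
  | succ m ih =>
    intro a mem ha hb
    rw [PySem.List.pyRange_one_cons (by omega : a < a + ((m:Nat)+1:Nat))]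
    rw [List.foldl_cons]
    set mem' := (if p a then PySem.List.pySetD mem a (PySem.List.pyGetD mem a 0 + 1) else mem) with hmem'
    have hlen' : mem'.length = mem.length := by
      rw [hmem']; split <;> simp [PySem.List.length_pySetD]
    have hget' : ∀ k : Nat, mem'.getD k 0 =
        if (k : Int) = a ∧ p a then mem.getD k 0 + 1 else mem.getD k 0 := by
      intro k
      rw [hmem']
      by_cases hpa : p a
      · rw [if_pos hpa, PySem.List.pySetD_of_nonneg mem _ ha, PySem.List.pyGetD_of_nonneg mem 0 ha]
        by_cases hk : (k : Int) = a
        · have hk' : k = a.toNat := by omega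
          have hlt : a.toNat < mem.length := by omega
          rw [if_pos ⟨hk, hpa⟩, hk', List.getD_eq_getElem _ _ (by simpa [List.length_set] using hlt),
            List.getElem_set_self, List.getD_eq_getElem _ _ hlt]
        · rw [if_neg (by tauto)]
          by_cases hkl : k < mem.length
          · rw [List.getD_eq_getElem _ _ (by simpa [List.length_set] using hkl),
              List.getD_eq_getElem _ _ hkl, List.getElem_set_ne (by omega)]
          · rw [List.getD_eq_default _ _ (by simpa [List.length_set] using not_lt.mp hkl),
              List.getD_eq_default _ _ (by omega)]
      · rw [if_neg hpa, if_neg (by tauto)]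
    have hrange : a + ((m:Nat)+1:Nat) = (a+1) + (m:Nat) := by push_cast; ring
    rw [hrange]
    obtain ⟨ihlen, ihget⟩ := ih (a+1) mem' (by omega) (by omega)
    refine ⟨by rw [ihlen, hlen'], fun k => ?_⟩
    rw [ihget k, hget' k]
    by_cases hk : (k:Int) = a
    · rw [if_neg (fun h => by omega : ¬(a + 1 ≤ (k:Int) ∧ (k:Int) < a + 1 + (m:Int) ∧ p k))]
      by_cases hpa : p a
      · rw [if_pos ⟨hk, hpa⟩, if_pos ⟨le_of_eq hk.symm, by omega, hk ▸ hpa⟩]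
      · rw [if_neg (fun h => hpa h.2), if_neg (fun h => hpa (hk ▸ h.2.2))]
    · rw [if_congr (show (a + 1 ≤ (k:Int) ∧ (k:Int) < a + 1 + (m:Int) ∧ p k) ↔
            (a ≤ (k:Int) ∧ (k:Int) < a + 1 + (m:Int) ∧ p k) from
          ⟨fun ⟨x, y, z⟩ => ⟨by omega, y, z⟩, fun ⟨x, y, z⟩ => ⟨by omega, y, z⟩⟩) rfl rfl]
      by_cases hc3 : a ≤ (k:Int) ∧ (k:Int) < a + 1 + (m:Int) ∧ p k
      · rw [if_pos hc3, if_pos hc3, if_neg (fun h => hk h.1)]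
      · rw [if_neg hc3, if_neg hc3, if_neg (fun h => hk h.1)]
lemma pv_outer (c : Int → Prop) [DecidablePred c] (q : Int → Int → Prop)
    [∀ i j, Decidable (q i j)] (n : Nat) :
    ∀ (L : List Int) (mem : List Int), mem.length = n →
    (L.foldl
        (fun mem i => if c i then mem
          else (PySem.List.pyRange 0 (n : Int) 1).foldl
            (fun mem j => if q i j then PySem.List.pySetD mem j (PySem.List.pyGetD mem j 0 + 1)
                          else mem) mem) mem).length = n ∧
    ∀ k : Nat, k < n →
      (L.foldl
        (fun mem i => if c i then mem
          else (PySem.List.pyRange 0 (n : Int) 1).foldl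
            (fun mem j => if q i j then PySem.List.pySetD mem j (PySem.List.pyGetD mem j 0 + 1)
                          else mem) mem) mem).getD k 0 =
      mem.getD k 0 + ((L.filter (fun i => decide ¬ c i)).countP (fun i => decide (q i k)) : Int) := by
  intro L
  induction L with
  | nil => intro mem h; exact ⟨h, fun k hk => by simp⟩
  | cons i L ih =>
    intro mem hmem
    rw [List.foldl_cons]
    by_cases hc : c i
    · rw [if_pos hc]
      obtain ⟨l1, g1⟩ := ih mem hmem
      refine ⟨l1, fun k hk => ?_⟩
      rw [g1 k hk, List.filter_cons, if_neg (by simp [hc])]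
    · rw [if_neg hc]
      have hin := pv_inner (q i) n 0 mem le_rfl (by omega)
      rw [zero_add] at hin
      obtain ⟨il, ig⟩ := hin
      obtain ⟨l1, g1⟩ := ih _ (il.trans hmem)
      refine ⟨l1, fun k hk => ?_⟩
      rw [g1 k hk, ig k]
      by_cases hq : q i (k:Int)
      · rw [if_pos (⟨by omega, by omega, hq⟩ : (0:Int) ≤ (k:Int) ∧ (k:Int) < (n:Int) ∧ q i k),
          List.filter_cons, if_pos (by simpa using hc), List.countP_cons,
          if_pos (by simpa using hq)]
        push_cast; ring
      · rw [if_neg (fun h => hq h.2.2), List.filter_cons, if_pos (by simpa using hc),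
          List.countP_cons, if_neg (by simpa using hq)]
        push_cast; ring
lemma pv_solution_eq (schedules : List Int) (timelogs : List (List Int)) (startday : Int) :
    solution schedules timelogs startday =
    (((List.range schedules.length).map
        (fun (k : Nat) => ((pvDays startday).countP
            (fun i => decide (pvTL timelogs k i > pvDL (schedules.getD k 0))) : Int))).count 0 : Int) := by
  simp only [solution]
  rw [PySem.List.foldl_append_singleton_eq_map
    (fun i => PySem.Int.mod (startday + i - 1) 7 + 1) _ [], List.nil_append]
  rw [show ((((PySem.List.pyRange 0 7 1).map
      (fun i => PySem.Int.mod (startday + i - 1) 7 + 1)).length : Nat) : Int) = 7 by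
    simp [PySem.List.length_pyRange_one]]
  rw [PySem.List.foldl_congr_mem _ _
    (fun (sc : List (Int × Int)) (i : Int) =>
      sc ++ [(PySem.List.pyGetD schedules i 0, pvDL (PySem.List.pyGetD schedules i 0))]) _
    (by intro acc x _; simp only [pvDL])]
  rw [PySem.List.foldl_pyRange_zero_pyGetD' schedules 0
    (fun acc x => acc ++ [(x, pvDL x)]) [],
    PySem.List.foldl_append_singleton_eq_map (fun x => (x, pvDL x)) _ [], List.nil_append]
  rw [PySem.List.foldl_congr_mem _ _
    (fun (mem : List Int) (i : Int) =>
      if (PySem.Int.mod (startday + i - 1) 7 + 1 = 6 ∨ PySem.Int.mod (startday + i - 1) 7 + 1 = 7)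
      then mem
      else (PySem.List.pyRange 0 (schedules.length : Int) 1).foldl
        (fun mem j =>
          if pvTL timelogs j i > pvDL (PySem.List.pyGetD schedules j 0) then
            PySem.List.pySetD mem j (PySem.List.pyGetD mem j 0 + 1)
          else mem) mem) _
    (by
      intro acc x hx
      obtain ⟨hx0, hx7⟩ := PySem.List.mem_pyRange_one.mp hx
      rw [PySem.List.pyGetD_map_pyRange_of_nonneg _ 7 x 0 hx0 hx7]
      congr 1
      apply PySem.List.foldl_congr_mem
      intro acc2 j hj
      obtain ⟨hj0, hjn⟩ := PySem.List.mem_pyRange_one.mp hj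
      rw [PySem.List.pyGetD_eq_getElem (schedules.map (fun x => (x, pvDL x))) (0, 0) hj0
        (by simpa using hjn)]
      rw [List.getElem_map]
      rw [PySem.List.pyGetD_eq_getElem schedules 0 hj0 (by simpa using hjn)]
      rfl)]
  obtain ⟨l1, g1⟩ := pv_outer
    (fun i => PySem.Int.mod (startday + i - 1) 7 + 1 = 6 ∨ PySem.Int.mod (startday + i - 1) 7 + 1 = 7)
    (fun i j => pvTL timelogs j i > pvDL (PySem.List.pyGetD schedules j 0))
    schedules.length (PySem.List.pyRange 0 7 1) (List.replicate schedules.length 0)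
    (List.length_replicate)
  congr 1
  congr 1
  apply List.ext_getElem (by rw [l1, List.length_map, List.length_range])
  intro k h1 h2
  have hk : k < schedules.length := by rwa [l1] at h1
  rw [← List.getD_eq_getElem _ 0 h1, g1 k hk, List.getD_replicate _ hk, zero_add,
    List.getElem_map, List.getElem_range]
  rw [show List.filter (fun i => decide ¬(PySem.Int.mod (startday + i - 1) 7 + 1 = 6 ∨
        PySem.Int.mod (startday + i - 1) 7 + 1 = 7)) (PySem.List.pyRange 0 7 1) = pvDays startday
      from by unfold pvDays; exact List.filter_congr (fun i _ => by simp [Bool.beq_eq_decide_eq])]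
  congr 1
  apply List.countP_congr
  intro i _
  simp
lemma pv_alt_eq (schedules : List Int) (timelogs : List (List Int)) (startday : Int) :
    solution_alt schedules timelogs startday =
    ((List.range schedules.length).countP
        (fun (k : Nat) => (pvDays startday).all
            (fun i => pvTL timelogs k i ≤ pvDL (schedules.getD k 0))) : Int) := by
  unfold solution_alt
  rw [PySem.List.enumerate_eq_map_pyRange schedules 0, List.foldl_map]
  rw [PySem.List.foldl_congr_mem _ _
    (fun (acc : Int) (j : Int) =>
      if ((pvDays startday).all
          (fun i => pvTL timelogs j i ≤ pvDL (PySem.List.pyGetD schedules j 0))) = true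
      then acc + 1 else acc) _
    (by intro acc x _; simp only [pvDays, pvTL, pvDL]; rfl)]
  rw [PySem.List.foldl_if_add_one
    (p := fun j : Int =>
      (pvDays startday).all
        (fun i => pvTL timelogs j i ≤ pvDL (PySem.List.pyGetD schedules j 0)))]
  rw [PySem.List.len_eq, PySem.List.pyRange_zero_nat, List.countP_map]
  rw [zero_add]
  congr 1
  apply List.countP_congr
  intro k _
  simp [Function.comp]
-- ===== VERDICT (by name: the statement is the Claim_ definition above) =====
theorem solution_spec : Claim_equal_solution := by
  intro schedules timelogs startday _ _
  unfold Spec_solution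
  rw [pv_solution_eq, pv_alt_eq, List.count_eq_countP, List.countP_map]
  congr 1
  apply List.countP_congr
  intro k _
  simp only [Function.comp]
  rw [Bool.eq_iff_iff]
  simp only [beq_iff_eq, Int.natCast_eq_zero, List.countP_eq_zero, List.all_eq_true,
    decide_eq_true_eq, not_lt]
  tauto
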